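-- pv_equiv track=rewrite | github.com/jack-at-someai/na-k-atpase-3d | charlotte-os/voice/tools/krf.py | read_sexps
-- ===== SOURCE A (Python) =====
-- def _strip_comment(line: str) -> str:
--     """Remove ;; comments from a line, respecting quoted strings."""
--     in_string = False
--     i = 0
--     while i < len(line):
--         c = line[i]
--         if c == '\\' and in_string:
--             i += 2  # skip escaped char inside string
--             continue
--         if c == '"':
--             in_string = not in_string
--         elif not in_string and i + 1 < len(line) and line[i:i+2] == ";;":
--             return line[:i]
--         i += 1
--     return line
--
-- def _count_parens(text: str, in_string: bool = False) -> tuple[int, bool]: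
--     """Count net parentheses (open - close) outside quoted strings.
--
--     Handles escaped quotes inside strings. Returns (net, in_string).
--     """
--     net = 0
--     i = 0
--     while i < len(text):
--         c = text[i]
--         if c == '\\' and in_string:
--             i += 2
--             continue
--         if c == '"':
--             in_string = not in_string
--         elif not in_string:
--             if c == '(':
--                 net += 1
--             elif c == ')':
--                 net -= 1
--         i += 1
--     return net, in_string
--
-- def read_sexps(text: str) -> list[tuple[str, int]]:
--     """Parse text into complete S-expressions with line numbers.
--
--     Returns list of (raw_sexp_string, start_line_number) tuples.
--     Line numbers are 1-based.
--     """
--     results = []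
--     buf = ""
--     depth = 0
--     in_string = False
--     start_line = 0
--
--     for line_no, line in enumerate(text.splitlines(), 1):
--         cleaned = _strip_comment(line.rstrip())
--         stripped = cleaned.strip()
--         if not stripped:
--             continue
--
--         if not buf:
--             start_line = line_no
--         buf += (" " if buf else "") + stripped
--
--         net, in_string = _count_parens(cleaned, in_string)
--         depth += net
--
--         if depth <= 0 and not in_string and buf.strip():
--             results.append((buf.strip(), start_line))
--             buf = ""
--             depth = 0
--             in_string = False
--
--     # Flush remainder (malformed — shouldn't happen in well-formed KRF)
--     if buf.strip():
--         results.append((buf.strip(), start_line))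
--
--     return results
-- ===== SOURCE B (Python) =====
-- def _scan(line: str, in_string: bool):
--     """One pass over a (rstripped) line: returns (comment-stripped text,
--     net paren count outside strings, outgoing string state).
--
--     `local` is the per-line string state the comment stripper uses (it always
--     starts False), `g` the cross-line string state the paren counter uses,
--     `skip` marks a character consumed by the counter's escape rule.
--     """
--     out = []
--     local = False
--     g = in_string
--     skip = False
--     net = 0
--
--     def feed(c):
--         nonlocal g, skip, net
--         if skip:
--             skip = False
--         elif c == '\\' and g:
--             skip = True
--         elif c == '"':
--             g = not g
--         elif not g:
--             if c == '(':
--                 net += 1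
--             elif c == ')':
--                 net -= 1
--
--     i = 0
--     n = len(line)
--     while i < n:
--         c = line[i]
--         if c == '\\' and local:
--             out.append(c)
--             feed(c)
--             if i + 1 < n:
--                 out.append(line[i + 1])
--                 feed(line[i + 1])
--             i += 2
--         elif c == '"':
--             out.append(c)
--             feed(c)
--             local = not local
--             i += 1
--         elif not local and c == ';' and i + 1 < n and line[i + 1] == ';':
--             break
--         else:
--             out.append(c)
--             feed(c)
--             i += 1
--     return "".join(out), net, g
--
--
-- def read_sexps(text: str) -> list[tuple[str, int]]:
--     """Parse text into complete S-expressions with line numbers.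
--
--     Returns list of (raw_sexp_string, start_line_number) tuples.
--     Line numbers are 1-based.
--     """
--     results = []
--     pieces = []
--     depth = 0
--     in_string = False
--     start_line = 0
--
--     for line_no, line in enumerate(text.splitlines(), 1):
--         cleaned, net, in_string_new = _scan(line.rstrip(), in_string)
--         stripped = cleaned.strip()
--         if not stripped:
--             continue
--         if not pieces:
--             start_line = line_no
--         pieces.append(stripped)
--         depth += net
--         in_string = in_string_new
--         if depth <= 0 and not in_string:
--             results.append((" ".join(pieces), start_line))
--             pieces = []
--             depth = 0
--             in_string = False
--
--     if pieces:
--         results.append((" ".join(pieces), start_line))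
--     return results
-- ===== Notes on version B (the rewrite author's own statement) =====
-- stated objective: alternative
-- what changed: A's two per-line scanning helpers (_strip_comment and _count_parens, each re-walking the line) are fused into one single-pass per-line automaton carrying both string states plus a skip flag, and A's growing string buffer is replaced by a piece list joined only at emission.
import Mathlib
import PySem

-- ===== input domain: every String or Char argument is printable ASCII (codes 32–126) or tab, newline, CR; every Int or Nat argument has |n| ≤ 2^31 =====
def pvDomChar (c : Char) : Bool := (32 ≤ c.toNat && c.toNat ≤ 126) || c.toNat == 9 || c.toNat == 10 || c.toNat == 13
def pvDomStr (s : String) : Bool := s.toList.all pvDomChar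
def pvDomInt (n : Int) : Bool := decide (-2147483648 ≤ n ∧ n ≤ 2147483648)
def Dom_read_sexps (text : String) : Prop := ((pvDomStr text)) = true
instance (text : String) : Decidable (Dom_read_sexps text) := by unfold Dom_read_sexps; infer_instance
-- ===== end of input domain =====

-- B replaces A's two per-line scanning helpers by ONE combined per-line automaton and the
-- string buffer by a piece list joined at emission (objective: alternative decomposition).

-- ===== PORT A =====

-- _strip_comment(line): while-loop with i (+1 / +2 on escape), ported as structural recursion;
-- returning [] in the ";;" branch is Python's `return line[:i]` (chars before i are the cons'es already emitted)
def stripCommentA : List Char → Bool → List Char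
  | [], _ => []
  | c :: rest, inStr =>
    if c = '\\' ∧ inStr = true then
      match rest with
      | [] => [c]
      | d :: rest2 => c :: d :: stripCommentA rest2 inStr
    else if c = '"' then c :: stripCommentA rest (!inStr)
    else if inStr = false ∧ c = ';' ∧ rest.head? = some ';' then []
    else c :: stripCommentA rest inStr

-- _count_parens(text, in_string)
def countParensA : List Char → Bool → Int → Int × Bool
  | [], inStr, net => (net, inStr)
  | c :: rest, inStr, net =>
    if c = '\\' ∧ inStr = true then
      match rest with
      | [] => (net, inStr)
      | _ :: rest2 => countParensA rest2 inStr net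
    else if c = '"' then countParensA rest (!inStr) net
    else if inStr = false then
      if c = '(' then countParensA rest inStr (net + 1)
      else if c = ')' then countParensA rest inStr (net - 1)
      else countParensA rest inStr net
    else countParensA rest inStr net

-- the `for line_no, line in enumerate(text.splitlines(), 1)` loop, state = (results, buf, depth, in_string, start_line)
def readAuxA : List String → Int → List (String × Int) → String → Int → Bool → Int → List (String × Int)
  | [], _, results, buf, _, _, startLine =>
      if PySem.Str.strip buf ≠ "" then results ++ [(PySem.Str.strip buf, startLine)] else results
  | line :: rest, lineNo, results, buf, depth, inStr, startLine =>
      let cleaned := stripCommentA (PySem.Str.rstrip line).toList false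
      let stripped := PySem.Chars.strip cleaned
      if stripped = [] then readAuxA rest (lineNo + 1) results buf depth inStr startLine
      else
        let startLine' := if buf = "" then lineNo else startLine
        let buf' := buf ++ (if buf = "" then "" else " ") ++ String.ofList stripped
        let r := countParensA cleaned inStr 0
        let depth' := depth + r.1
        if depth' ≤ 0 ∧ r.2 = false ∧ PySem.Str.strip buf' ≠ "" then
          readAuxA rest (lineNo + 1) (results ++ [(PySem.Str.strip buf', startLine')]) "" 0 false startLine'
        else
          readAuxA rest (lineNo + 1) results buf' depth' r.2 startLine'

def read_sexps (text : String) : List (String × Int) :=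
  readAuxA (PySem.Str.splitlines text) 1 [] "" 0 false 0

-- ===== PORT B =====

-- Source B's feed(c): one step of the paren/string counter, state (g, skip, net)
def feedB (c : Char) (g skip : Bool) (net : Int) : Bool × Bool × Int :=
  if skip = true then (g, false, net)
  else if c = '\\' ∧ g = true then (g, true, net)
  else if c = '"' then (!g, false, net)
  else if g = false then
    if c = '(' then (g, false, net + 1)
    else if c = ')' then (g, false, net - 1)
    else (g, false, net)
  else (g, false, net)

-- Source B's _scan while-loop: comment stripping (state `local_`) and feeding in one pass
def scanB : List Char → Bool → Bool → Bool → Int → List Char × Int × Bool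
  | [], _, g, _, net => ([], net, g)
  | c :: rest, local_, g, skip, net =>
    if c = '\\' ∧ local_ = true then
      match rest with
      | [] =>
        let f := feedB c g skip net
        ([c], f.2.2, f.1)
      | d :: rest2 =>
        let f1 := feedB c g skip net
        let f2 := feedB d f1.1 f1.2.1 f1.2.2
        let r := scanB rest2 local_ f2.1 f2.2.1 f2.2.2
        (c :: d :: r.1, r.2)
    else if c = '"' then
      let f := feedB c g skip net
      let r := scanB rest (!local_) f.1 f.2.1 f.2.2
      (c :: r.1, r.2)
    else if local_ = false ∧ c = ';' ∧ rest.head? = some ';' then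
      ([], net, g)
    else
      let f := feedB c g skip net
      let r := scanB rest local_ f.1 f.2.1 f.2.2
      (c :: r.1, r.2)

-- Source B's main loop, state = (results, pieces, depth, in_string, start_line)
def readAuxB : List String → Int → List (String × Int) → List String → Int → Bool → Int → List (String × Int)
  | [], _, results, pieces, _, _, startLine =>
      if pieces ≠ [] then results ++ [(PySem.Str.join " " pieces, startLine)] else results
  | line :: rest, lineNo, results, pieces, depth, inStr, startLine =>
      let s := scanB (PySem.Str.rstrip line).toList false inStr false 0
      let stripped := PySem.Chars.strip s.1
      if stripped = [] then readAuxB rest (lineNo + 1) results pieces depth inStr startLine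
      else
        let startLine' := if pieces = [] then lineNo else startLine
        let pieces' := pieces ++ [String.ofList stripped]
        let depth' := depth + s.2.1
        if depth' ≤ 0 ∧ s.2.2 = false then
          readAuxB rest (lineNo + 1) (results ++ [(PySem.Str.join " " pieces', startLine')]) [] 0 false startLine'
        else
          readAuxB rest (lineNo + 1) results pieces' depth' s.2.2 startLine'

def read_sexps_alt (text : String) : List (String × Int) :=
  readAuxB (PySem.Str.splitlines text) 1 [] [] 0 false 0

-- ===== PRECONDITION & SPEC =====
def Spec_read_sexps (text : String) (out : List (String × Int)) : Prop := out = read_sexps_alt text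
instance (text : String) (out : List (String × Int)) : Decidable (Spec_read_sexps text out) := by unfold Spec_read_sexps; infer_instance

-- ===== CLAIM (what is proved, stated in full; the proofs are below) =====
def Claim_equal_read_sexps : Prop := ∀ (text : String), Dom_read_sexps text → Spec_read_sexps text (read_sexps text)

-- ===== LEMMAS AND PROOFS =====

def countSkip : List Char → Bool → Bool → Int → Int × Bool
  | [], g, _, net => (net, g)
  | c :: rest, g, skip, net =>
    if skip = true then countSkip rest g false net
    else if c = '\\' ∧ g = true then countSkip rest g true net
    else if c = '"' then countSkip rest (!g) false net
    else if g = false then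
      if c = '(' then countSkip rest g false (net + 1)
      else if c = ')' then countSkip rest g false (net - 1)
      else countSkip rest g false net
    else countSkip rest g false net

theorem countSkip_cons (c : Char) (cs : List Char) (g skip : Bool) (net : Int) :
    countSkip (c :: cs) g skip net =
      countSkip cs (feedB c g skip net).1 (feedB c g skip net).2.1 (feedB c g skip net).2.2 := by
  simp only [countSkip, feedB]
  split_ifs <;> rfl

theorem countSkip_singleton (c : Char) (g skip : Bool) (net : Int) :
    countSkip [c] g skip net = ((feedB c g skip net).2.2, (feedB c g skip net).1) := by
  rw [countSkip_cons]; simp [countSkip]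

theorem countSkip_eq_countParensA : ∀ (cs : List Char) (g : Bool) (net : Int),
    countSkip cs g false net = countParensA cs g net := by
  intro cs g net
  fun_induction countParensA cs g net <;> simp_all [countSkip]

theorem scanB_eq : ∀ (cs : List Char) (l g skip : Bool) (net : Int),
    scanB cs l g skip net = (stripCommentA cs l, countSkip (stripCommentA cs l) g skip net) := by
  suffices h : ∀ (n : Nat) (cs : List Char), cs.length ≤ n → ∀ (l g skip : Bool) (net : Int),
      scanB cs l g skip net = (stripCommentA cs l, countSkip (stripCommentA cs l) g skip net) by
    exact fun cs => h cs.length cs le_rfl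
  intro n
  induction n with
  | zero =>
    intro cs hcs l g skip net
    have : cs = [] := by cases cs <;> simp_all
    subst this
    simp [scanB, stripCommentA, countSkip]
  | succ n ih =>
    intro cs hcs l g skip net
    match cs with
    | [] => simp [scanB, stripCommentA, countSkip]
    | c :: rest =>
      cases rest with
      | nil =>
        simp only [scanB, stripCommentA]
        split_ifs with h1 h2 h3
        · rw [countSkip_singleton]
        · rw [countSkip_singleton]
        · rfl
        · rw [countSkip_singleton]
      | cons d rest2 =>
        have hl2 : rest2.length ≤ n := by simp at hcs; omega
        have hl1 : (d :: rest2).length ≤ n := by simp at hcs ⊢; omega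
        simp only [scanB, stripCommentA]
        split_ifs with h1 h2 h3
        · rw [ih rest2 hl2, countSkip_cons, countSkip_cons]
        · rw [ih (d :: rest2) hl1, countSkip_cons]
        · simp [countSkip]
        · rw [ih (d :: rest2) hl1, countSkip_cons]

def stripped (cs : List Char) : Prop :=
  (∀ c ∈ cs.head?, PySem.Chars.isspace c = false) ∧ (∀ c ∈ cs.getLast?, PySem.Chars.isspace c = false)

theorem lstrip_of_head (cs : List Char) (h : ∀ c ∈ cs.head?, PySem.Chars.isspace c = false) :
    PySem.Chars.lstrip cs = cs := by
  cases cs with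
  | nil => rfl
  | cons a t => simp_all [PySem.Chars.lstrip]

theorem rstrip_of_last (cs : List Char) (h : ∀ c ∈ cs.getLast?, PySem.Chars.isspace c = false) :
    PySem.Chars.rstrip cs = cs := by
  unfold PySem.Chars.rstrip
  rw [show List.dropWhile PySem.Chars.isspace cs.reverse = cs.reverse from ?_, List.reverse_reverse]
  cases hr : cs.reverse with
  | nil => rfl
  | cons a t =>
    have : cs.getLast? = some a := by rw [← List.head?_reverse, hr]; rfl
    simp_all

theorem strip_of_stripped (cs : List Char) (h : stripped cs) : PySem.Chars.strip cs = cs := by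
  obtain ⟨h1, h2⟩ := h
  unfold PySem.Chars.strip
  rw [lstrip_of_head cs h1, rstrip_of_last cs h2]

theorem head?_dropWhile (p : Char → Bool) (l : List Char) :
    ∀ c ∈ (List.dropWhile p l).head?, p c = false := by
  induction l with
  | nil => simp
  | cons a t ih =>
    by_cases h : p a
    · simpa [List.dropWhile_cons, h] using ih
    · simp_all

theorem stripped_strip (cs : List Char) : stripped (PySem.Chars.strip cs) := by
  unfold PySem.Chars.strip PySem.Chars.rstrip
  constructor
  · intro c hc
    have hpre : (List.dropWhile PySem.Chars.isspace (PySem.Chars.lstrip cs).reverse).reverse <+: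
        PySem.Chars.lstrip cs := by
      obtain ⟨t, ht⟩ := List.dropWhile_suffix (l := (PySem.Chars.lstrip cs).reverse) PySem.Chars.isspace
      exact ⟨t.reverse, by rw [← List.reverse_append, ht, List.reverse_reverse]⟩
    obtain ⟨t, ht⟩ := hpre
    cases he : (List.dropWhile PySem.Chars.isspace (PySem.Chars.lstrip cs).reverse).reverse with
    | nil => rw [he] at hc; simp at hc
    | cons a t2 =>
      rw [he] at hc ht
      have hca : a = c := by simpa using hc
      subst hca
      have h1 : (List.dropWhile PySem.Chars.isspace cs).head? = some a := by
        have h2 : PySem.Chars.lstrip cs = a :: (t2 ++ t) := by rw [← ht]; simp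
        rw [show List.dropWhile PySem.Chars.isspace cs = PySem.Chars.lstrip cs from rfl, h2]; rfl
      exact head?_dropWhile PySem.Chars.isspace cs a (Option.mem_def.2 h1)
  · intro c hc
    rw [List.getLast?_reverse] at hc
    exact head?_dropWhile _ _ c hc

theorem stripped_glue (x y : List Char) (hx : stripped x) (hy : stripped y)
    (hx0 : x ≠ []) (hy0 : y ≠ []) : stripped (x ++ ' ' :: y) := by
  constructor
  · intro c hc
    cases x with
    | nil => exact absurd rfl hx0
    | cons a t =>
      simp at hc
      subst hc
      exact hx.1 _ (by simp)
  · intro c hc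
    obtain ⟨l, b, rfl⟩ := (List.eq_nil_or_concat y).resolve_left hy0
    simp only [List.concat_eq_append] at hc hy ⊢
    have hb : (x ++ ' ' :: (l ++ [b])).getLast? = some b := by
      rw [← List.head?_reverse]
      simp
    rw [hb] at hc
    simp at hc
    subst hc
    refine hy.2 _ (Option.mem_def.2 ?_)
    rw [← List.head?_reverse]
    simp

def joinL (ps : List (List Char)) : List Char := PySem.Chars.join [' '] ps

theorem joinL_cons_cons (p q : List Char) (rest : List (List Char)) :
    joinL (p :: q :: rest) = p ++ ' ' :: joinL (q :: rest) := by
  simp only [joinL, PySem.Chars.join_cons_cons]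
  simp

theorem joinL_append_singleton (ps : List (List Char)) (x : List Char) :
    joinL (ps ++ [x]) = if ps = [] then x else joinL ps ++ ' ' :: x := by
  induction ps with
  | nil => simp [joinL, PySem.Chars.join_singleton]
  | cons p ps ih =>
    cases ps with
    | nil => simp [joinL, PySem.Chars.join_cons_cons, PySem.Chars.join_singleton]
    | cons q rest =>
      simp only [List.cons_append] at ih ⊢
      rw [joinL_cons_cons, ih]
      simp [joinL_cons_cons, List.append_assoc]

def InvP (ps : List (List Char)) : Prop := ∀ p ∈ ps, p ≠ [] ∧ stripped p

theorem joinL_ne_nil (ps : List (List Char)) (h : InvP ps) (h0 : ps ≠ []) : joinL ps ≠ [] := by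
  cases ps with
  | nil => exact absurd rfl h0
  | cons p rest =>
    cases rest with
    | nil => simpa [joinL, PySem.Chars.join_singleton] using (h p (by simp)).1
    | cons q rs =>
      simp only [joinL, PySem.Chars.join_cons_cons]
      intro hnil
      simp at hnil

theorem stripped_joinL (ps : List (List Char)) (h : InvP ps) : stripped (joinL ps) := by
  induction ps with
  | nil => exact ⟨by simp [joinL, PySem.Chars.join_nil], by simp [joinL, PySem.Chars.join_nil]⟩
  | cons p ps ih =>
    cases ps with
    | nil =>
      simpa [joinL, PySem.Chars.join_singleton] using (h p (by simp)).2
    | cons q rest =>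
      have hrest : InvP (q :: rest) := fun r hr => h r (by simp [hr])
      have hglue := stripped_glue p (joinL (q :: rest)) (h p (by simp)).2 (ih hrest)
        (h p (by simp)).1 (joinL_ne_nil _ hrest (by simp))
      simp only [joinL, PySem.Chars.join_cons_cons]
      simpa [joinL, List.append_assoc] using hglue

theorem str_nil_iff (s : String) : s = "" ↔ s.toList = [] := by
  constructor
  · intro h; subst h; rfl
  · intro h; exact String.toList_inj.mp (by rw [h]; rfl)

theorem join_space_toList (pieces : List String) :
    (PySem.Str.join " " pieces).toList = joinL (pieces.map String.toList) := by
  rw [PySem.Str.toList_join]; rfl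

theorem buf_nil_iff (buf : String) (pieces : List String)
    (hbuf : buf.toList = joinL (pieces.map String.toList))
    (hinv : InvP (pieces.map String.toList)) : buf = "" ↔ pieces = [] := by
  constructor
  · intro h
    by_contra hp
    have hne : buf.toList ≠ [] := by
      rw [hbuf]; exact joinL_ne_nil _ hinv (by simpa using hp)
    exact hne (by rw [h]; rfl)
  · intro h; subst h; exact (str_nil_iff buf).2 (by rw [hbuf]; rfl)

theorem bufp_toList (buf : String) (pieces : List String) (stl : List Char)
    (hbuf : buf.toList = joinL (pieces.map String.toList))
    (hinv : InvP (pieces.map String.toList)) :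
    ((buf ++ if buf = "" then "" else " ") ++ String.ofList stl).toList
      = joinL (List.map String.toList (pieces ++ [String.ofList stl])) := by
  by_cases hp : pieces = []
  · have hb : buf = "" := (buf_nil_iff buf pieces hbuf hinv).2 hp
    subst hp
    subst hb
    simp [joinL, PySem.Chars.join_singleton]
  · have hb : ¬ buf = "" := fun h => hp ((buf_nil_iff buf pieces hbuf hinv).1 h)
    rw [List.map_append, List.map_cons, List.map_nil, joinL_append_singleton,
        if_neg hb, if_neg (by simpa using hp : ¬ List.map String.toList pieces = [])]
    simp [hbuf]

theorem invp_append (pieces : List String) (stl : List Char)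
    (hinv : InvP (pieces.map String.toList)) (h0 : stl ≠ []) (h1 : stripped stl) :
    InvP (List.map String.toList (pieces ++ [String.ofList stl])) := by
  intro p hp
  rw [List.map_append, List.map_cons, List.map_nil] at hp
  rcases List.mem_append.1 hp with h | h
  · exact hinv p h
  · simp at h
    subst h
    exact ⟨h0, h1⟩

theorem readAux_eq : ∀ (lines : List String) (lineNo : Int) (results : List (String × Int))
    (buf : String) (pieces : List String) (depth : Int) (inStr : Bool) (startLine : Int),
    buf.toList = joinL (pieces.map String.toList) →
    InvP (pieces.map String.toList) →
    readAuxA lines lineNo results buf depth inStr startLine =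
      readAuxB lines lineNo results pieces depth inStr startLine := by
  intro lines
  induction lines with
  | nil =>
    intro lineNo results buf pieces depth inStr startLine hbuf hinv
    simp only [readAuxA, readAuxB]
    have hstrip : (PySem.Str.strip buf).toList = buf.toList := by
      rw [PySem.Str.toList_strip, hbuf, strip_of_stripped _ (stripped_joinL _ hinv), ← hbuf]
    cases pieces with
    | nil =>
      have hb : buf = "" := (str_nil_iff buf).2 (by rw [hbuf]; rfl)
      subst hb
      have h0 : PySem.Str.strip "" = "" := String.toList_inj.mp (by rw [PySem.Str.toList_strip]; rfl)
      simp [h0]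
    | cons p ps =>
      have hne : buf.toList ≠ [] := by
        rw [hbuf]; exact joinL_ne_nil _ hinv (by simp)
      have h1 : ¬ PySem.Str.strip buf = "" := by
        intro h; rw [str_nil_iff, hstrip] at h; exact hne h
      rw [if_pos h1, if_pos (by simp : ¬ (p :: ps) = [])]
      have hval : PySem.Str.strip buf = PySem.Str.join " " (p :: ps) := by
        apply String.toList_inj.mp
        rw [hstrip, join_space_toList, hbuf]
      rw [hval]
  | cons line rest ih =>
    intro lineNo results buf pieces depth inStr startLine hbuf hinv
    simp only [readAuxA, readAuxB, scanB_eq, countSkip_eq_countParensA]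
    by_cases hs : PySem.Chars.strip (stripCommentA (PySem.Str.rstrip line).toList false) = []
    · rw [if_pos hs, if_pos hs]
      exact ih _ _ _ _ _ _ _ hbuf hinv
    · rw [if_neg hs, if_neg hs]
      have hbuf' := bufp_toList buf pieces
        (PySem.Chars.strip (stripCommentA (PySem.Str.rstrip line).toList false)) hbuf hinv
      have hinv' := invp_append pieces
        (PySem.Chars.strip (stripCommentA (PySem.Str.rstrip line).toList false)) hinv hs
        (stripped_strip _)
      have hstr' : stripped ((buf ++ if buf = "" then "" else " ") ++
          String.ofList (PySem.Chars.strip (stripCommentA (PySem.Str.rstrip line).toList false))).toList := by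
        rw [hbuf']; exact stripped_joinL _ hinv'
      have hnil' : ((buf ++ if buf = "" then "" else " ") ++
          String.ofList (PySem.Chars.strip (stripCommentA (PySem.Str.rstrip line).toList false))).toList ≠ [] := by
        rw [hbuf']; exact joinL_ne_nil _ hinv' (by simp)
      have hcond : ¬ PySem.Str.strip ((buf ++ if buf = "" then "" else " ") ++
          String.ofList (PySem.Chars.strip (stripCommentA (PySem.Str.rstrip line).toList false))) = "" := by
        intro h
        rw [str_nil_iff, PySem.Str.toList_strip, strip_of_stripped _ hstr'] at h
        exact hnil' h
      have hstart : (if buf = "" then lineNo else startLine)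
          = (if pieces = [] then lineNo else startLine) := by
        by_cases hp : pieces = [] <;> simp [buf_nil_iff buf pieces hbuf hinv, hp]
      have hval : PySem.Str.strip ((buf ++ if buf = "" then "" else " ") ++
            String.ofList (PySem.Chars.strip (stripCommentA (PySem.Str.rstrip line).toList false)))
          = PySem.Str.join " " (pieces ++
            [String.ofList (PySem.Chars.strip (stripCommentA (PySem.Str.rstrip line).toList false))]) := by
        apply String.toList_inj.mp
        rw [PySem.Str.toList_strip, strip_of_stripped _ hstr', join_space_toList, hbuf']
      by_cases hc : depth + (countParensA (stripCommentA (PySem.Str.rstrip line).toList false) inStr 0).1 ≤ 0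
          ∧ (countParensA (stripCommentA (PySem.Str.rstrip line).toList false) inStr 0).2 = false
      · rw [if_pos ⟨hc.1, hc.2, hcond⟩, if_pos hc, hval, hstart]
        exact ih _ _ _ _ _ _ _ (by simp [joinL, PySem.Chars.join_nil]) (by intro p hp; simp at hp)
      · rw [if_neg (fun h => hc ⟨h.1, h.2.1⟩), if_neg hc, hstart]
        exact ih _ _ _ _ _ _ _ hbuf' hinv'


-- ===== VERDICT (by name: the statement is the Claim_ definition above) =====
theorem read_sexps_spec : Claim_equal_read_sexps := by
  intro text _
  unfold Spec_read_sexps read_sexps read_sexps_alt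
  exact readAux_eq _ 1 [] "" [] 0 false 0 (by simp [joinL, PySem.Chars.join_nil]) (by intro p hp; simp at hp)
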